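-- pv_equiv track=rewrite | github.com/mnmilford/openclaw-file-browser | server.py | _parse_ext_filter
-- ===== SOURCE A (Python) =====
-- def _parse_ext_filter(ext_value):
--     if not ext_value:
--         return []
--     parts = str(ext_value).strip().lower().split()
--     values = []
--     for part in parts:
--         for chunk in part.split(","):
--             chunk = chunk.strip()
--             if not chunk:
--                 continue
--             values.append(chunk if chunk.startswith(".") else "." + chunk)
--     return values
-- ===== SOURCE B (Python) =====
-- def _parse_ext_filter(ext_value):
--     if not ext_value:
--         return []
--     values = []
--     token = ""
--     for ch in str(ext_value).lower():
--         if ch == "," or ch.isspace():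
--             if token:
--                 values.append(token if token.startswith(".") else "." + token)
--             token = ""
--         else:
--             token += ch
--     if token:
--         values.append(token if token.startswith(".") else "." + token)
--     return values
-- ===== Notes on version B (the rewrite author's own statement) =====
-- stated objective: alternative
-- what changed: Replaces A's strip + whitespace-split + per-part comma-split nested loops by a single character-level scanner that accumulates a token and flushes it at any comma or whitespace.
import Mathlib
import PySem

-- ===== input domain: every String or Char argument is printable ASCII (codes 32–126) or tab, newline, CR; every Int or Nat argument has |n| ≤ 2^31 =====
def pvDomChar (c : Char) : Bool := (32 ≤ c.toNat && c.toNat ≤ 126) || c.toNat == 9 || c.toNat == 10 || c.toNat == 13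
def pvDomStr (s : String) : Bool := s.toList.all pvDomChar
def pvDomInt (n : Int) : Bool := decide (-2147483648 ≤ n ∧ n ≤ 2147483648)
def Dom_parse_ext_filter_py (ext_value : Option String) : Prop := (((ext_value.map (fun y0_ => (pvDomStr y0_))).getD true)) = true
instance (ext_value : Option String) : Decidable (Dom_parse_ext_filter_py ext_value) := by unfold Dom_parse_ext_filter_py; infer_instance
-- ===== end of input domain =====

-- B replaces A's strip + whitespace-split + per-part comma-split nested loops by a single
-- character-level scanner (objective: alternative decomposition; same asymptotic cost).

-- ===== PORT A =====
-- literal transliteration of A: strip, lower, split-on-whitespace, then split each part on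
-- ",", strip each chunk, skip empties, prepend "." unless present.
def parse_ext_filter_py (ext_value : Option String) : List String :=
  match ext_value with
  | none => []
  | some s =>
    if s = "" then []
    else
      let parts := PySem.Chars.split₀ (PySem.Chars.lower (PySem.Chars.strip s.toList))
      (parts.foldl (fun values part =>
        (PySem.Chars.splitOn part [',']).foldl (fun values chunk =>
          let chunk := PySem.Chars.strip chunk
          if chunk.isEmpty then values
          else values ++ [if PySem.Chars.startswith chunk ['.'] then chunk else '.' :: chunk])
          values) []).map String.mk

-- ===== PORT B =====
-- literal transliteration of B: one left-to-right scan accumulating `token`, flushing the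
-- (dot-normalized) token at every comma or whitespace character, with a final flush.
def parse_ext_filter_py_alt (ext_value : Option String) : List String :=
  match ext_value with
  | none => []
  | some s =>
    if s = "" then []
    else
      let r := (PySem.Chars.lower s.toList).foldl
        (fun (st : List (List Char) × List Char) ch =>
          if ch = ',' || PySem.Chars.isspace ch then
            (if st.2.isEmpty then st.1
             else st.1 ++ [if PySem.Chars.startswith st.2 ['.'] then st.2 else '.' :: st.2], [])
          else (st.1, st.2 ++ [ch])) ([], [])
      (if r.2.isEmpty then r.1
       else r.1 ++ [if PySem.Chars.startswith r.2 ['.'] then r.2 else '.' :: r.2]).map String.mk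

-- ===== PRECONDITION & SPEC =====
def Spec_parse_ext_filter_py (ext_value : Option String) (out : List String) : Prop := out = parse_ext_filter_py_alt ext_value
instance (ext_value : Option String) (out : List String) : Decidable (Spec_parse_ext_filter_py ext_value out) := by unfold Spec_parse_ext_filter_py; infer_instance

-- ===== CLAIM (what is proved, stated in full; the proofs are below) =====
def Claim_equal_parse_ext_filter_py : Prop := ∀ (ext_value : Option String), Dom_parse_ext_filter_py ext_value → Spec_parse_ext_filter_py ext_value (parse_ext_filter_py ext_value)

-- ===== LEMMAS AND PROOFS =====

-- combined delimiter of the task: comma or whitespace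
def pvDelim (c : Char) : Bool := c = ',' || PySem.Chars.isspace c

def pvDotted (t : List Char) : List Char :=
  if PySem.Chars.startswith t ['.'] then t else '.' :: t

-- reference tokenizers (proof-only)
def pvTAux (cur : List Char) : List Char → List (List Char)
  | [] => if cur.isEmpty then [] else [cur]
  | c :: rest =>
    if pvDelim c then (if cur.isEmpty then pvTAux [] rest else cur :: pvTAux [] rest)
    else pvTAux (cur ++ [c]) rest

def pvWAux (cur : List Char) : List Char → List (List Char)
  | [] => if cur.isEmpty then [] else [cur]
  | c :: rest =>
    if PySem.Chars.isspace c then (if cur.isEmpty then pvWAux [] rest else cur :: pvWAux [] rest)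
    else pvWAux (cur ++ [c]) rest

def pvCAux (cur : List Char) : List Char → List (List Char)
  | [] => [cur]
  | c :: rest => if c = ',' then cur :: pvCAux [] rest else pvCAux (cur ++ [c]) rest

theorem pv_split0_go (cs : List Char) : ∀ cur acc,
    PySem.Chars.split₀.go cs cur acc = acc.reverse ++ pvWAux cur.reverse cs := by
  induction cs with
  | nil =>
    intro cur acc
    simp only [PySem.Chars.split₀.go, pvWAux]
    by_cases h : cur = [] <;> simp [h]
  | cons c rest ih =>
    intro cur acc
    simp only [PySem.Chars.split₀.go, pvWAux]
    by_cases hs : PySem.Chars.isspace c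
    · by_cases h : cur = [] <;> simp [hs, h, ih]
    · simp [hs, ih]

theorem pv_split0 (cs : List Char) : PySem.Chars.split₀ cs = pvWAux [] cs := by
  simpa using pv_split0_go cs [] []

theorem pv_splitOn_go (fuel : Nat) : ∀ (l cur : List Char) (acc' : List (List Char)),
    l.length < fuel →
    PySem.Chars.splitOn.go [','] fuel l cur acc' = acc'.reverse ++ pvCAux cur.reverse l := by
  induction fuel with
  | zero => intro l cur acc' h; omega
  | succ fuel ih =>
    intro l cur acc' h
    cases l with
    | nil => simp [PySem.Chars.splitOn.go, pvCAux]
    | cons c rest =>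
      by_cases hc : c = ','
      · have hp : List.isPrefixOf [','] (c :: rest) = true := by simp [List.isPrefixOf, hc]
        simp only [PySem.Chars.splitOn.go, hp, if_pos]
        rw [show List.drop [','].length (c :: rest) = rest from rfl,
          ih rest [] (cur.reverse :: acc') (by simp at h; omega)]
        simp [pvCAux, hc]
      · have hp : List.isPrefixOf [','] (c :: rest) = false := by
          simp [List.isPrefixOf]; intro h'; exact absurd h'.symm hc
        simp only [PySem.Chars.splitOn.go, hp, Bool.false_eq_true, if_false]
        rw [ih rest (c :: cur) acc' (by simp at h; omega)]
        simp [pvCAux, hc]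

theorem pv_splitOn (cs : List Char) : PySem.Chars.splitOn cs [','] = pvCAux [] cs := by
  have := pv_splitOn_go (cs.length + 1) cs [] [] (by omega)
  simpa [PySem.Chars.splitOn] using this

theorem pv_dropWhile_all_false (l : List Char) (h : ∀ c ∈ l, PySem.Chars.isspace c = false) :
    List.dropWhile PySem.Chars.isspace l = l := by
  cases l with
  | nil => rfl
  | cons c rest => simp [List.dropWhile_cons, h c List.mem_cons_self]

-- strip is the identity on whitespace-free lists
theorem pv_strip_nows (l : List Char) (h : ∀ c ∈ l, PySem.Chars.isspace c = false) :
    PySem.Chars.strip l = l := by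
  have h1 : PySem.Chars.lstrip l = l := pv_dropWhile_all_false l h
  rw [PySem.Chars.strip, h1, PySem.Chars.rstrip,
    pv_dropWhile_all_false l.reverse (fun c hc => h c (List.mem_reverse.mp hc)),
    List.reverse_reverse]

-- members of pvCAux chunks come from cur ++ l
theorem pv_cAux_mem (l : List Char) : ∀ cur ch, ch ∈ pvCAux cur l → ∀ c ∈ ch, c ∈ cur ∨ c ∈ l := by
  induction l with
  | nil =>
    intro cur ch hch c hc
    simp [pvCAux] at hch; subst hch; exact Or.inl hc
  | cons d rest ih =>
    intro cur ch hch c hc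
    simp only [pvCAux] at hch
    by_cases hd : d = ','
    · rw [if_pos hd] at hch
      rcases List.mem_cons.mp hch with h | h
      · subst h; exact Or.inl hc
      · rcases ih [] ch h c hc with h' | h'
        · simp at h'
        · exact Or.inr (List.mem_cons_of_mem _ h')
    · rw [if_neg hd] at hch
      rcases ih (cur ++ [d]) ch hch c hc with h' | h'
      · rcases List.mem_append.mp h' with h'' | h''
        · exact Or.inl h''
        · simp at h''; subst h''; exact Or.inr List.mem_cons_self
      · exact Or.inr (List.mem_cons_of_mem _ h')

-- members of pvWAux parts are whitespace-free
theorem pv_wAux_mem (l : List Char) : ∀ cur p, p ∈ pvWAux cur l →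
    (∀ c ∈ cur, PySem.Chars.isspace c = false) →
    ∀ c ∈ p, PySem.Chars.isspace c = false := by
  induction l with
  | nil =>
    intro cur p hp hcur c hc
    by_cases h : cur = [] <;> simp [pvWAux, h] at hp
    subst hp; exact hcur c hc
  | cons d rest ih =>
    intro cur p hp hcur c hc
    simp only [pvWAux] at hp
    by_cases hd : PySem.Chars.isspace d
    · rw [if_pos hd] at hp
      by_cases h : cur = []
      · rw [if_pos (by simp [h])] at hp
        exact ih [] p hp (by simp) c hc
      · rw [if_neg (by simpa using h)] at hp
        rcases List.mem_cons.mp hp with h' | h'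
        · subst h'; exact hcur c hc
        · exact ih [] p h' (by simp) c hc
    · rw [if_neg hd] at hp
      refine ih (cur ++ [d]) p hp ?_ c hc
      intro e he
      rcases List.mem_append.mp he with h' | h'
      · exact hcur e h'
      · simp at h'; subst h'; simpa using hd

-- filtering empties out of comma chunks of a whitespace-free part gives combined tokens
theorem pv_cAux_filter (p : List Char) (hp : ∀ c ∈ p, PySem.Chars.isspace c = false) :
    ∀ cur, (pvCAux cur p).filter (fun ch => !ch.isEmpty) = pvTAux cur p := by
  induction p with
  | nil =>
    intro cur
    by_cases h : cur = [] <;> simp [pvCAux, pvTAux, h]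
  | cons c rest ih =>
    intro cur
    have hrest : ∀ c ∈ rest, PySem.Chars.isspace c = false := fun d hd => hp d (List.mem_cons_of_mem _ hd)
    simp only [pvCAux, pvTAux]
    by_cases hc : c = ','
    · have hdel : pvDelim c = true := by simp [pvDelim, hc]
      rw [if_pos hc, if_pos hdel, List.filter_cons]
      by_cases h : cur = [] <;> simp [h, ih hrest]
    · have hdel : pvDelim c = false := by
        simp [pvDelim, hc]; simpa using hp c List.mem_cons_self
      rw [if_neg hc, if_neg (by simp [hdel]), ih hrest]

-- pvTAux over an all-whitespace suffix
theorem pv_tAux_allspace (ws : List Char) (h : ∀ c ∈ ws, PySem.Chars.isspace c = true) :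
    ∀ cur, pvTAux cur ws = if cur.isEmpty then [] else [cur] := by
  induction ws with
  | nil => intro cur; simp [pvTAux]
  | cons c rest ih =>
    intro cur
    have hdel : pvDelim c = true := by simp [pvDelim, h c List.mem_cons_self]
    have hrest := fun d hd => h d (List.mem_cons_of_mem _ hd)
    simp only [pvTAux, if_pos hdel]
    by_cases hc : cur = [] <;> simp [hc, ih hrest]

theorem pv_tAux_append_ws (m : List Char) : ∀ ws, (∀ c ∈ ws, PySem.Chars.isspace c = true) →
    ∀ cur, pvTAux cur (m ++ ws) = pvTAux cur m := by
  induction m with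
  | nil =>
    intro ws hws cur
    simp [pv_tAux_allspace ws hws cur, pvTAux]
  | cons c rest ih =>
    intro ws hws cur
    simp only [List.cons_append, pvTAux]
    by_cases hdel : pvDelim c
    · by_cases hc : cur = [] <;> simp [hdel, hc, ih ws hws]
    · simp [hdel, ih ws hws]

theorem pv_tAux_lstrip (m : List Char) :
    pvTAux [] (List.dropWhile PySem.Chars.isspace m) = pvTAux [] m := by
  induction m with
  | nil => simp
  | cons c rest ih =>
    by_cases hc : PySem.Chars.isspace c
    · have hdel : pvDelim c = true := by simp [pvDelim, hc]
      simpa [List.dropWhile_cons, hc, pvTAux, hdel] using ih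
    · simp [List.dropWhile_cons, hc]

theorem pv_tAux_strip (m : List Char) : pvTAux [] (PySem.Chars.strip m) = pvTAux [] m := by
  have hdecomp : PySem.Chars.lstrip m =
      PySem.Chars.strip m ++ (List.takeWhile PySem.Chars.isspace (PySem.Chars.lstrip m).reverse).reverse := by
    rw [PySem.Chars.strip, PySem.Chars.rstrip, ← List.reverse_append,
      List.takeWhile_append_dropWhile, List.reverse_reverse]
  have hws : ∀ c ∈ (List.takeWhile PySem.Chars.isspace (PySem.Chars.lstrip m).reverse).reverse,
      PySem.Chars.isspace c = true := by
    intro c hc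
    exact List.mem_takeWhile_imp (List.mem_reverse.mp hc)
  calc pvTAux [] (PySem.Chars.strip m)
      = pvTAux [] (PySem.Chars.strip m ++ (List.takeWhile PySem.Chars.isspace (PySem.Chars.lstrip m).reverse).reverse) :=
        (pv_tAux_append_ws _ _ hws []).symm
    _ = pvTAux [] (PySem.Chars.lstrip m) := by rw [← hdecomp]
    _ = pvTAux [] m := pv_tAux_lstrip m

-- lower does not create or destroy whitespace
theorem pv_isspace_nonspace (d : Char) (h1 : 65 ≤ d.toNat) (h2 : d.toNat ≤ 122) :
    PySem.Chars.isspace d = false := by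
  simp only [PySem.Chars.isspace]
  simp only [Bool.or_eq_false_iff, Bool.and_eq_false_iff, decide_eq_false_iff_not]
  omega

theorem pv_isspace_lower (c : Char) : PySem.Chars.isspace (PySem.Chars.lowerChar c) = PySem.Chars.isspace c := by
  simp only [PySem.Chars.lowerChar]
  by_cases h : PySem.Chars.isupper c
  · rw [if_pos h]
    simp only [PySem.Chars.isupper, Bool.and_eq_true, decide_eq_true_eq] at h
    obtain ⟨h1, h2⟩ := h
    rw [Char.le_def, UInt32.le_iff_toNat_le] at h1 h2
    have hA : 65 ≤ c.toNat := h1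
    have hZ : c.toNat ≤ 90 := h2
    have hofs : (Char.ofNat (c.toNat + 32)).toNat = c.toNat + 32 := by
      rw [Char.toNat_ofNat, if_pos]; left; omega
    have hs1 : PySem.Chars.isspace (Char.ofNat (c.toNat + 32)) = false :=
      pv_isspace_nonspace _ (by rw [hofs]; omega) (by rw [hofs]; omega)
    have hs2 : PySem.Chars.isspace c = false := pv_isspace_nonspace c (by omega) (by omega)
    rw [hs1, hs2]
  · rw [if_neg h]

theorem pv_lower_strip (m : List Char) :
    PySem.Chars.lower (PySem.Chars.strip m) = PySem.Chars.strip (PySem.Chars.lower m) := by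
  have hdw : ∀ l : List Char, List.dropWhile PySem.Chars.isspace (List.map PySem.Chars.lowerChar l)
      = List.map PySem.Chars.lowerChar (List.dropWhile PySem.Chars.isspace l) := by
    intro l
    induction l with
    | nil => rfl
    | cons c r ih =>
      simp only [List.map_cons, List.dropWhile_cons, pv_isspace_lower c]
      by_cases hc : PySem.Chars.isspace c
      · simp [hc, ih]
      · simp [hc]
  simp only [PySem.Chars.strip, PySem.Chars.lower, PySem.Chars.lstrip, PySem.Chars.rstrip]
  rw [hdw, ← List.map_reverse, hdw, List.map_reverse]

-- decomposition lemmas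
theorem pv_wAux_take (l : List Char) : ∀ cur, cur ≠ [] →
    pvWAux cur l = (cur ++ List.takeWhile (fun c => !PySem.Chars.isspace c) l) ::
      pvWAux [] (List.dropWhile (fun c => !PySem.Chars.isspace c) l) := by
  induction l with
  | nil => intro cur h; simp [pvWAux, h]
  | cons c rest ih =>
    intro cur h
    by_cases hc : PySem.Chars.isspace c
    · simp [pvWAux, hc, h, List.takeWhile_cons, List.dropWhile_cons]
    · simp only [pvWAux, if_neg hc, List.takeWhile_cons, List.dropWhile_cons]
      rw [ih (cur ++ [c]) (by simp)]
      simp [hc]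

theorem pv_tAux_take (p : List Char) : ∀ rest c, PySem.Chars.isspace c = true → ∀ cur,
    pvTAux cur (p ++ c :: rest) = pvTAux cur p ++ pvTAux [] rest := by
  induction p with
  | nil =>
    intro rest c hc cur
    have hdel : pvDelim c = true := by simp [pvDelim, hc]
    by_cases h : cur = [] <;> simp [pvTAux, hdel, h]
  | cons d p' ih =>
    intro rest c hc cur
    simp only [List.cons_append, pvTAux]
    by_cases hdel : pvDelim d
    · by_cases h : cur = [] <;> simp [hdel, h, ih rest c hc]
    · simp [hdel, ih rest c hc]

theorem pv_dropWhile_head (p : Char → Bool) (l : List Char) : ∀ d q',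
    List.dropWhile p l = d :: q' → p d = false := by
  induction l with
  | nil => intro d q' h; simp at h
  | cons c rest ih =>
    intro d q' h
    rw [List.dropWhile_cons] at h
    by_cases hc : p c
    · exact ih d q' (by simpa [hc] using h)
    · simp [hc] at h
      rw [← h.1]; simpa using hc

-- MAIN: flattening the comma-tokens of the whitespace-parts = combined tokens
theorem pv_main (cs : List Char) :
    (pvWAux [] cs).flatMap (fun p => pvTAux [] p) = pvTAux [] cs := by
  induction hn : cs.length using Nat.strong_induction_on generalizing cs with
  | _ n ih =>
    cases cs with
    | nil => simp [pvWAux, pvTAux]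
    | cons c rest =>
      by_cases hc : PySem.Chars.isspace c
      · have hdel : pvDelim c = true := by simp [pvDelim, hc]
        simp only [pvWAux, if_pos hc, List.isEmpty_nil, if_pos rfl, pvTAux, hdel]
        exact ih rest.length (by simp [← hn]) rest rfl
      · have hpne : List.takeWhile (fun c => !PySem.Chars.isspace c) (c :: rest) ≠ [] := by
          simp [List.takeWhile_cons, hc]
        have hW : pvWAux [] (c :: rest) =
            (List.takeWhile (fun c => !PySem.Chars.isspace c) (c :: rest)) ::
            pvWAux [] (List.dropWhile (fun c => !PySem.Chars.isspace c) (c :: rest)) := by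
          simp only [pvWAux, if_neg hc, List.nil_append]
          rw [pv_wAux_take rest [c] (by simp)]
          simp [List.takeWhile_cons, List.dropWhile_cons, hc]
        rw [hW, List.flatMap_cons]
        rcases hq : List.dropWhile (fun c => !PySem.Chars.isspace c) (c :: rest) with _ | ⟨d, q'⟩
        · have hpq : List.takeWhile (fun c => !PySem.Chars.isspace c) (c :: rest) = c :: rest := by
            have h0 := List.takeWhile_append_dropWhile (p := fun c => !PySem.Chars.isspace c) (l := c :: rest)
            rw [hq] at h0; simpa using h0
          rw [hpq]
          simp [pvWAux]
        · have hd : PySem.Chars.isspace d = true := by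
            simpa using pv_dropWhile_head (fun c => !PySem.Chars.isspace c) (c :: rest) d q' hq
          have hpq : List.takeWhile (fun c => !PySem.Chars.isspace c) (c :: rest) ++ (d :: q') = c :: rest := by
            have h0 := List.takeWhile_append_dropWhile (p := fun c => !PySem.Chars.isspace c) (l := c :: rest)
            rw [hq] at h0; exact h0
          have hlen : q'.length < n := by
            have h1 := congrArg List.length hpq
            have hple : 1 ≤ (List.takeWhile (fun c => !PySem.Chars.isspace c) (c :: rest)).length := by
              cases hp' : List.takeWhile (fun c => !PySem.Chars.isspace c) (c :: rest) with
              | nil => exact absurd hp' hpne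
              | cons _ _ => simp
            simp only [List.length_append, List.length_cons] at h1 hn hple ⊢
            omega
          have hd2 : pvWAux [] (d :: q') = pvWAux [] q' := by simp [pvWAux, hd]
          rw [hd2, ih q'.length hlen q' rfl]
          conv_rhs => rw [← hpq, pv_tAux_take _ q' d hd []]

-- A-side folds
theorem pv_innerA (chunks : List (List Char))
    (h : ∀ ch ∈ chunks, ∀ c ∈ ch, PySem.Chars.isspace c = false) :
    ∀ values, chunks.foldl (fun values chunk =>
        let chunk := PySem.Chars.strip chunk
        if chunk.isEmpty then values
        else values ++ [if PySem.Chars.startswith chunk ['.'] then chunk else '.' :: chunk]) values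
      = values ++ (chunks.filter (fun ch => !ch.isEmpty)).map pvDotted := by
  induction chunks with
  | nil => intro values; simp
  | cons ch rest ih =>
    intro values
    have hst : PySem.Chars.strip ch = ch := pv_strip_nows ch (h ch List.mem_cons_self)
    have hrest := fun ch' hch' => h ch' (List.mem_cons_of_mem _ hch')
    rw [List.foldl_cons, ih hrest]
    by_cases he : ch.isEmpty
    · simp [hst, he, List.filter_cons]
    · simp [hst, he, List.filter_cons, pvDotted]

theorem pv_outerA (parts : List (List Char))
    (h : ∀ p ∈ parts, ∀ c ∈ p, PySem.Chars.isspace c = false) :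
    ∀ values, parts.foldl (fun values part =>
        (PySem.Chars.splitOn part [',']).foldl (fun values chunk =>
          let chunk := PySem.Chars.strip chunk
          if chunk.isEmpty then values
          else values ++ [if PySem.Chars.startswith chunk ['.'] then chunk else '.' :: chunk]) values) values
      = values ++ parts.flatMap (fun p => (pvTAux [] p).map pvDotted) := by
  induction parts with
  | nil => intro values; simp
  | cons p rest ih =>
    intro values
    have hp := h p List.mem_cons_self
    have hrest := fun p' hp' => h p' (List.mem_cons_of_mem _ hp')
    simp only [List.foldl_cons]
    rw [pv_splitOn, pv_innerA (pvCAux [] p)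
      (fun ch hch c hc => by
        rcases pv_cAux_mem p [] ch hch c hc with h' | h'
        · simp at h'
        · exact hp c h'),
      pv_cAux_filter p hp, ih hrest]
    simp

-- B-side fold: helpers naming B's step and final flush (proof-only)
def pvFlush (r : List (List Char) × List Char) : List (List Char) :=
  if r.2.isEmpty then r.1
  else r.1 ++ [if PySem.Chars.startswith r.2 ['.'] then r.2 else '.' :: r.2]

def pvStep (st : List (List Char) × List Char) (ch : Char) : List (List Char) × List Char :=
  if ch = ',' || PySem.Chars.isspace ch then
    (if st.2.isEmpty then st.1
     else st.1 ++ [if PySem.Chars.startswith st.2 ['.'] then st.2 else '.' :: st.2], [])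
  else (st.1, st.2 ++ [ch])

theorem pv_foldB (cs : List Char) : ∀ acc cur,
    pvFlush (cs.foldl pvStep (acc, cur)) = acc ++ (pvTAux cur cs).map pvDotted := by
  induction cs with
  | nil =>
    intro acc cur
    by_cases h : cur = [] <;> simp [pvFlush, pvTAux, h, pvDotted]
  | cons c rest ih =>
    intro acc cur
    rw [List.foldl_cons]
    by_cases hdel : pvDelim c
    · have hb : (c = ',' || PySem.Chars.isspace c) = true := hdel
      rw [show pvStep (acc, cur) c =
          (if cur.isEmpty then acc
           else acc ++ [if PySem.Chars.startswith cur ['.'] then cur else '.' :: cur], []) from by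
        simp [pvStep, hb]]
      rw [ih _ []]
      by_cases h : cur = []
      · simp [pvTAux, hdel, h]
      · simp [pvTAux, hdel, h, pvDotted]
    · have hb : (c = ',' || PySem.Chars.isspace c) = false := by simpa [pvDelim] using hdel
      rw [show pvStep (acc, cur) c = (acc, cur ++ [c]) from by simp [pvStep, hb]]
      rw [ih acc (cur ++ [c])]
      simp [pvTAux, hdel]

-- ===== VERDICT (by name: the statement is the Claim_ definition above) =====
theorem parse_ext_filter_py_spec : Claim_equal_parse_ext_filter_py := by
  intro ext_value _
  unfold Spec_parse_ext_filter_py parse_ext_filter_py parse_ext_filter_py_alt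
  cases ext_value with
  | none => rfl
  | some s =>
    by_cases hs : s = ""
    · simp [hs]
    · simp only [if_neg hs]
      congr 1
      rw [pv_split0,
        pv_outerA _ (fun p hp => pv_wAux_mem _ [] p hp (by simp)) [],
        show (pvWAux [] (PySem.Chars.lower (PySem.Chars.strip s.toList))).flatMap
              (fun p => (pvTAux [] p).map pvDotted)
            = ((pvWAux [] (PySem.Chars.lower (PySem.Chars.strip s.toList))).flatMap
              (fun p => pvTAux [] p)).map pvDotted from (List.map_flatMap).symm,
        pv_main, pv_lower_strip, pv_tAux_strip]
      have hB := pv_foldB (PySem.Chars.lower s.toList) [] []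
      rw [List.nil_append] at hB
      exact hB.symm
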